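-- pv_equiv track=rewrite | github.com/NikhilaBanukumar/GeeksForGeeks-and-Leetcode | strings8.py | count
-- ===== SOURCE A (Python) =====
-- def count(string):
--     map={}
--     for i in range(len(string)):
--         if string[i] not in map:
--             map[string[i]]=1
--         else:
--             map[string[i]]+=1
--     min=len(string)
--     max=0
--     for i in map:
--         if map[i]<min:
--             min=map[i]
--         if map[i]>max:
--             max=map[i]
--     if max-min==1:
--         return True
--     else:
--         return False
-- ===== SOURCE B (Python) =====
-- def count(string):
--     s = sorted(string)
--     runs = []
--     prev = None
--     n = 0
--     for c in s:
--         if c == prev: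
--             n += 1
--         else:
--             if prev is not None:
--                 runs.append(n)
--             prev = c
--             n = 1
--     if prev is not None:
--         runs.append(n)
--     if not runs:
--         return False
--     return max(runs) - min(runs) == 1
-- ===== Notes on version B (the rewrite author's own statement) =====
-- stated objective: alternative
-- what changed: Replaces the hash-map frequency count plus distinct-key min/max scan with a sort-then-group pass that collects run lengths of consecutive equal characters and compares their max and min.
import Mathlib
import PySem

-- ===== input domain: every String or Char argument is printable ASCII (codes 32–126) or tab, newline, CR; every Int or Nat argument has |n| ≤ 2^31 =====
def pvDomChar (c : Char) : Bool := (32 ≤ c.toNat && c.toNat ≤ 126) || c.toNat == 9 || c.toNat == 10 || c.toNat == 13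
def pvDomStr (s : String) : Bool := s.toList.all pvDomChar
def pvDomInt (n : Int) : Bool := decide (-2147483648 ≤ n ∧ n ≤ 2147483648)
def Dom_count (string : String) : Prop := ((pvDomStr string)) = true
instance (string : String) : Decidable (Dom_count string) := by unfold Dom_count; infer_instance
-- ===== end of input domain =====

-- B replaces A's hash-map frequency count + distinct-key min/max scan by a sort-then-group
-- pass over run lengths (objective: alternative decomposition, same return value).

-- ===== PORT A =====
def count (string : String) : Bool :=
  let l := string.toList
  let m := (PySem.List.pyRange 0 (l.length : Int) 1).foldl
    (fun (d : PySem.Dict Char Int) i =>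
      match PySem.List.pyGet? l i with
      | some c => if d.contains c = false then d.insert c 1 else d.insert c (d.getD c 0 + 1)
      | none => d)
    PySem.Dict.empty
  let p := m.keys.foldl
    (fun (p : Int × Int) k =>
      (if m.getD k 0 < p.1 then m.getD k 0 else p.1,
       if m.getD k 0 > p.2 then m.getD k 0 else p.2))
    ((l.length : Int), 0)
  if p.2 - p.1 = 1 then true else false

-- ===== PORT B =====
-- one iteration of B's grouping loop over the sorted characters (state: runs, prev, n)
def bStep (st : List Int × Option Char × Int) (c : Char) : List Int × Option Char × Int :=
  if st.2.1 = some c then (st.1, st.2.1, st.2.2 + 1)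
  else ((match st.2.1 with | some _ => st.1 ++ [st.2.2] | none => st.1), some c, 1)

-- the trailing 'if prev is not None: runs.append(n)'
def bFinish (st : List Int × Option Char × Int) : List Int :=
  match st.2.1 with | some _ => st.1 ++ [st.2.2] | none => st.1

def count_alt (string : String) : Bool :=
  let s := PySem.List.sorted string.toList (fun c => c) false
  let runs := bFinish (s.foldl bStep ([], none, 0))
  if runs = [] then false
  else
    match PySem.List.max? runs (fun x => x), PySem.List.min? runs (fun x => x) with
    | some mx, some mn => decide (mx - mn = 1)
    | _, _ => false

-- ===== PRECONDITION & SPEC =====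
def Spec_count (string : String) (out : Bool) : Prop := out = count_alt string
instance (string : String) (out : Bool) : Decidable (Spec_count string out) := by unfold Spec_count; infer_instance

-- ===== CLAIM (what is proved, stated in full; the proofs are below) =====
def Claim_equal_count : Prop := ∀ (string : String), Dom_count string → Spec_count string (count string)

-- ===== LEMMAS AND PROOFS =====

-- expanding the B-side run list over a cons: the head's count gathers the head itself
theorem ofList_cons_map_count (c : Char) (rest : List Char) :
    (PySem.Set.ofList (c :: rest)).map (fun x => (((c :: rest).count x : Nat) : Int)) =
      ((rest.count c : Int) + 1) ::
        (PySem.Set.discard (PySem.Set.ofList rest) c).map (fun x => ((rest.count x : Nat) : Int)) := by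
  rw [PySem.Set.ofList_cons, List.map_cons, List.count_cons_self]
  push_cast
  congr 1
  apply List.map_congr_left
  intro a ha
  have hne : a ≠ c := ((PySem.Set.mem_discard _ _ _).mp ha).2
  rw [List.count_cons_of_ne (Ne.symm hne)]

-- B's grouping loop, running with a pending run (prev = some c0, length k) over a sorted
-- tail s, produces the pending run extended by s's copies of c0, then one run per further
-- distinct character of s, carrying its multiplicity.
theorem runFold : ∀ (s : List Char), s.Pairwise (· ≤ ·) →
    ∀ (c0 : Char), (∀ x ∈ s, c0 ≤ x) → ∀ (k : Int) (runs : List Int),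
    bFinish (s.foldl bStep (runs, some c0, k)) =
      runs ++ (k + (s.count c0 : Int)) ::
        (PySem.Set.discard (PySem.Set.ofList s) c0).map (fun x => (s.count x : Int)) := by
  intro s
  induction s with
  | nil =>
      intro _ c0 _ k runs
      simp [bFinish, PySem.Set.discard]
  | cons c rest ih =>
      intro hs c0 hmin k runs
      have hrest : rest.Pairwise (· ≤ ·) := hs.of_cons
      have hcle : ∀ x ∈ rest, c ≤ x := fun x hx => List.rel_of_pairwise_cons hs hx
      by_cases hc : c = c0
      · subst hc
        have h1 : bStep (runs, some c, k) c = (runs, some c, k + 1) := by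
          simp [bStep]
        rw [List.foldl_cons, h1,
          ih hrest c (by intro x hx; exact hcle x hx) (k + 1) runs]
        have hco : PySem.Set.discard (PySem.Set.ofList (c :: rest)) c
            = PySem.Set.discard (PySem.Set.ofList rest) c := by
          rw [PySem.Set.ofList_cons]
          simp [PySem.Set.discard, List.filter_filter]
        have hmap : (PySem.Set.discard (PySem.Set.ofList rest) c).map
              (fun x => (((c :: rest).count x : Nat) : Int))
            = (PySem.Set.discard (PySem.Set.ofList rest) c).map
              (fun x => ((rest.count x : Nat) : Int)) := by
          apply List.map_congr_left
          intro a ha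
          have hne : a ≠ c := ((PySem.Set.mem_discard _ _ _).mp ha).2
          rw [List.count_cons_of_ne (Ne.symm hne)]
        rw [hco, hmap, List.count_cons_self]
        congr 2
        push_cast
        omega
      · have hc0notin : c0 ∉ (c :: rest) := by
          intro hmem
          have h1 : c0 ≤ c := hmin c (by simp)
          rcases List.mem_cons.mp hmem with h | h
          · exact hc h.symm
          · exact hc (le_antisymm (hcle c0 h) h1)
        have h1 : bStep (runs, some c0, k) c = (runs ++ [k], some c, 1) := by
          simp [bStep]
          intro h; exact absurd h.symm hc
        rw [List.foldl_cons, h1, ih hrest c hcle 1 (runs ++ [k])]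
        have hcnt0 : (c :: rest).count c0 = 0 := List.count_eq_zero.mpr hc0notin
        have hdis : PySem.Set.discard (PySem.Set.ofList (c :: rest)) c0
            = PySem.Set.ofList (c :: rest) := by
          apply List.filter_eq_self.mpr
          intro a ha
          have : a ≠ c0 := by
            intro h; subst h
            exact hc0notin ((PySem.Set.mem_ofList _ _).mp ha)
          simp [this]
        rw [hcnt0, hdis, ofList_cons_map_count]
        simp only [List.append_assoc, List.cons_append, List.nil_append]
        congr 2
        · push_cast; omega
        · rw [add_comm]

-- B's grouping loop from the initial state: one run per distinct character, in first-occurrence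
-- order, carrying its multiplicity.
theorem runFoldNone (s : List Char) (hs : s.Pairwise (· ≤ ·)) :
    bFinish (s.foldl bStep ([], none, 0)) =
      (PySem.Set.ofList s).map (fun x => (s.count x : Int)) := by
  cases s with
  | nil => simp [bFinish]
  | cons c rest =>
      have h1 : bStep (([] : List Int), (none : Option Char), (0 : Int)) c = ([], some c, 1) := by
        simp [bStep]
      rw [List.foldl_cons, h1,
        runFold rest hs.of_cons c (fun x hx => List.rel_of_pairwise_cons hs hx) 1 []]
      rw [ofList_cons_map_count]
      simp only [List.nil_append]
      congr 1
      omega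

-- A's first loop builds the character counter of the string
theorem dictLoop_eq_counter (l : List Char) :
    (PySem.List.pyRange 0 (l.length : Int) 1).foldl
      (fun (d : PySem.Dict Char Int) i =>
        match PySem.List.pyGet? l i with
        | some c => if d.contains c = false then d.insert c 1 else d.insert c (d.getD c 0 + 1)
        | none => d)
      PySem.Dict.empty = PySem.Dict.counter l := by
  rw [PySem.List.foldl_congr_mem _ _
    (fun (d : PySem.Dict Char Int) i =>
      (fun (d : PySem.Dict Char Int) (c : Char) =>
        if d.contains c = false then d.insert c 1 else d.insert c (d.getD c 0 + 1))
        d (PySem.List.pyGetD l i ' ')) _ ?_]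
  · rw [PySem.List.foldl_pyRange_zero_pyGetD' l ' '
      (fun (d : PySem.Dict Char Int) (c : Char) =>
        if d.contains c = false then d.insert c 1 else d.insert c (d.getD c 0 + 1))
      PySem.Dict.empty]
    rw [PySem.List.foldl_congr_mem _ _
      (fun (d : PySem.Dict Char Int) (c : Char) => d.insert c (d.getD c 0 + 1)) _ ?_]
    · exact PySem.Dict.foldl_insert_getD_add_one_eq_counter l
    · intro acc c _
      by_cases h : acc.contains c
      · simp [h]
      · have h0 : acc.getD c 0 = 0 :=
          PySem.Dict.getD_of_not_contains _ _ (by simpa using h)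
        simp [h, h0]
  · intro acc i hi
    obtain ⟨h0, hlt⟩ := PySem.List.mem_pyRange_one.mp hi
    obtain ⟨n, rfl⟩ := Int.eq_ofNat_of_zero_le h0
    have hn : n < l.length := by exact_mod_cast hlt
    simp [PySem.List.pyGet?_natCast, List.getElem?_eq_getElem hn,
      PySem.List.pyGetD_eq_getElem l ' ' h0 hlt]

-- A's value: the min/max scan over the counter's values, written over the distinct
-- characters' counts
theorem countA_eval (string : String) :
    count string =
      (if ((PySem.Set.ofList string.toList).map
            (fun c => ((string.toList.count c : Nat) : Int))).foldl max 0
          - ((PySem.Set.ofList string.toList).map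
            (fun c => ((string.toList.count c : Nat) : Int))).foldl min
              (string.toList.length : Int) = 1
        then true else false) := by
  unfold count
  dsimp only
  rw [dictLoop_eq_counter]
  rw [PySem.List.foldl_congr_mem _ _
    (fun (p : Int × Int) (k : Char) =>
      ((fun (a : Int) (k : Char) => min a ((string.toList.count k : Nat) : Int)) p.1 k,
       (fun (a : Int) (k : Char) => max a ((string.toList.count k : Nat) : Int)) p.2 k)) _ ?_]
  · rw [PySem.List.foldl_prod_mk
      (fun (a : Int) (k : Char) => min a ((string.toList.count k : Nat) : Int))
      (fun (a : Int) (k : Char) => max a ((string.toList.count k : Nat) : Int)),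
      PySem.Dict.keys_counter]
    rw [show ∀ (init : Int), (PySem.Set.ofList string.toList).foldl
          (fun (a : Int) (k : Char) => min a ((string.toList.count k : Nat) : Int)) init
        = ((PySem.Set.ofList string.toList).map
            (fun c => ((string.toList.count c : Nat) : Int))).foldl min init
      from fun init => (List.foldl_map).symm]
    rw [show ∀ (init : Int), (PySem.Set.ofList string.toList).foldl
          (fun (a : Int) (k : Char) => max a ((string.toList.count k : Nat) : Int)) init
        = ((PySem.Set.ofList string.toList).map
            (fun c => ((string.toList.count c : Nat) : Int))).foldl max init
      from fun init => (List.foldl_map).symm]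
  · intro acc k _
    rw [PySem.Dict.getD_counter]
    simp only [Prod.mk.injEq]
    constructor
    · rw [min_def]; split_ifs <;> omega
    · rw [max_def]; split_ifs <;> omega

-- ===== VERDICT (by name: the statement is the Claim_ definition above) =====
theorem count_spec : Claim_equal_count := by
  intro string _
  unfold Spec_count
  rw [countA_eval]
  unfold count_alt
  dsimp only
  by_cases hl : string.toList = []
  · have hnil : PySem.List.sorted ([] : List Char) (fun c => c) false = [] := by
      rw [PySem.List.sorted_eq_nil_iff]
    simp [hl, hnil, bFinish]
  · have hsne : PySem.List.sorted string.toList (fun c => c) false ≠ [] := by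
      simpa [PySem.List.sorted_eq_nil_iff] using hl
    have hsort : (PySem.List.sorted string.toList (fun c => c) false).Pairwise (· ≤ ·) :=
      PySem.List.sorted_pairwise string.toList (fun c => c)
    have hperm : (PySem.List.sorted string.toList (fun c => c) false).Perm string.toList :=
      PySem.List.sorted_perm _ _ _
    rw [runFoldNone _ hsort]
    cases hofl : PySem.Set.ofList (PySem.List.sorted string.toList (fun c => c) false) with
    | nil =>
        exfalso
        obtain ⟨c, t, hst⟩ := List.exists_cons_of_ne_nil hsne
        have : c ∈ PySem.Set.ofList (PySem.List.sorted string.toList (fun c => c) false) :=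
          (PySem.Set.mem_ofList _ _).mpr (by rw [hst]; exact List.mem_cons_self)
        rw [hofl] at this
        exact absurd this (List.not_mem_nil)
    | cons k0 kt =>
        have hk0s : k0 ∈ PySem.List.sorted string.toList (fun c => c) false :=
          (PySem.Set.mem_ofList _ _).mp (hofl ▸ List.mem_cons_self)
        have hk0l : k0 ∈ string.toList := hperm.mem_iff.mp hk0s
        have hmapeq : (k0 :: kt).map
              (fun x => (((PySem.List.sorted string.toList (fun c => c) false).count x : Nat) : Int))
            = (k0 :: kt).map (fun x => ((string.toList.count x : Nat) : Int)) :=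
          List.map_congr_left (fun a _ => by rw [hperm.count_eq])
        rw [hmapeq, List.map_cons]
        have hkeysperm : (k0 :: kt).Perm (PySem.Set.ofList string.toList) := by
          rw [← hofl]
          exact (List.perm_ext_iff_of_nodup (PySem.Set.nodup_ofList _)
            (PySem.Set.nodup_ofList _)).mpr
            (fun a => by simp [PySem.Set.mem_ofList, hperm.mem_iff])
        have hcperm : ((k0 :: kt).map (fun x => ((string.toList.count x : Nat) : Int))).Perm
            ((PySem.Set.ofList string.toList).map
              (fun c => ((string.toList.count c : Nat) : Int))) := hkeysperm.map _
        rw [← hcperm.foldl_eq 0, ← hcperm.foldl_eq (string.toList.length : Int)]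
        rw [List.map_cons, List.foldl_cons, List.foldl_cons]
        rw [max_eq_right (Int.natCast_nonneg _),
          min_eq_right (by exact_mod_cast List.count_le_length (l := string.toList) (a := k0))]
        simp only [List.cons_ne_nil, if_false]
        rw [PySem.List.max?_id_cons, PySem.List.min?_id_cons]
        split_ifs with h <;> simp [h]
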